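-- pv_equiv track=rewrite | github.com/hardanimal/reactor | test/test_relay.py | bitop_discharge
-- ===== SOURCE A (Python) =====
-- def bitop_discharge(data):
--     # discharge
--     high = (data & 0xF0) >> 4
--     low = data & 0x0F
--     RELAY03 = 0x0
--     #RELAY47 = 0xAA
--     RELAY47 = 0x0
--     for i in range(4):
--         b = high & 0x01
--         b = b << (i*2 + 1)
--
--         a = low & 0x01
--         a = a << (i*2 + 1)
--
--         RELAY47 += b
--         RELAY03 += a
--         high = high >> 1
--         low = low >> 1
--
--     return RELAY47, RELAY03
-- ===== SOURCE B (Python) =====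
-- # Precomputed 16-entry table: SPREAD[n] spreads nibble n's bits to positions 1,3,5,7.
-- SPREAD = [((n & 1) << 1) | ((n & 2) << 2) | ((n & 4) << 3) | ((n & 8) << 4) for n in range(16)]
--
-- def bitop_discharge(data):
--     return SPREAD[(data & 0xF0) >> 4], SPREAD[data & 0x0F]
-- ===== Notes on version B (the rewrite author's own statement) =====
-- stated objective: idiomatic
-- what changed: Replaces the 4-iteration bit-scanning loop with a precomputed 16-entry spread table indexed once per nibble.
import Mathlib
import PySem

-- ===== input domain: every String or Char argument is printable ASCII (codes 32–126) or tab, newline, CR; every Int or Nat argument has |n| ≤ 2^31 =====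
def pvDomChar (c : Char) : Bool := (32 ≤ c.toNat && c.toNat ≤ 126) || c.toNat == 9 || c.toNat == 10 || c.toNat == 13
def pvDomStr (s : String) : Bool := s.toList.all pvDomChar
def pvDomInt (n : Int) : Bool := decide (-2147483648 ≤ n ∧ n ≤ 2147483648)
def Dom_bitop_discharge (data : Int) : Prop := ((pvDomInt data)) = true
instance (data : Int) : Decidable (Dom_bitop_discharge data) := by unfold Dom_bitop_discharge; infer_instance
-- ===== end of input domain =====

-- B replaces A's 4-iteration bit-scanning loop with a precomputed 16-entry nibble-spread
-- table indexed once per nibble (idiomatic/data-structure change; same exact results).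

-- ===== PORT A =====
-- literal transliteration of A: mask the two nibbles, then a 4-step loop that
-- accumulates each low bit shifted to position i*2+1 and shifts the nibbles right.
def bitop_discharge (data : Int) : Int × Int :=
  let high := (PySem.Int.band data 0xF0) >>> 4
  let low := PySem.Int.band data 0x0F
  let s : Int × Int × Int × Int :=
    (List.range 4).foldl
      (fun (st : Int × Int × Int × Int) (i : Nat) =>
        let (high, low, r47, r03) := st
        let b := (PySem.Int.band high 0x01) <<< (i * 2 + 1)
        let a := (PySem.Int.band low 0x01) <<< (i * 2 + 1)
        (high >>> 1, low >>> 1, r47 + b, r03 + a))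
      (high, low, 0, 0)
  (s.2.2.1, s.2.2.2)

-- ===== PORT B =====
-- the comprehension building SPREAD in Source B
def pvSPREAD : List Int :=
  (List.range 16).map (fun n =>
    PySem.Int.bor
      (PySem.Int.bor
        (PySem.Int.bor ((PySem.Int.band n 1) <<< 1) ((PySem.Int.band n 2) <<< 2))
        ((PySem.Int.band n 4) <<< 3))
      ((PySem.Int.band n 8) <<< 4))

-- SPREAD[i]: both indices are provably in [0,16), so plain in-range list indexing
-- (getD with .toNat on a nonnegative index) is exact for Python's SPREAD[i].
def bitop_discharge_alt (data : Int) : Int × Int :=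
  (pvSPREAD.getD ((PySem.Int.band data 0xF0) >>> 4).toNat 0,
   pvSPREAD.getD (PySem.Int.band data 0x0F).toNat 0)

-- ===== PRECONDITION & SPEC =====
def Spec_bitop_discharge (data : Int) (out : Int × Int) : Prop := out = bitop_discharge_alt data
instance (data : Int) (out : Int × Int) : Decidable (Spec_bitop_discharge data out) := by unfold Spec_bitop_discharge; infer_instance

-- ===== CLAIM (what is proved, stated in full; the proofs are below) =====
def Claim_equal_bitop_discharge : Prop := ∀ (data : Int), Dom_bitop_discharge data → Spec_bitop_discharge data (bitop_discharge data)

-- ===== LEMMAS AND PROOFS =====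

-- masking with a nonnegative mask lands in [0, mask]
theorem band_mask_bounds (a m : Int) (hm : 0 ≤ m) :
    0 ≤ PySem.Int.band a m ∧ PySem.Int.band a m ≤ m := by
  unfold PySem.Int.band
  have hand := Nat.and_le_right (n := a.toNat) (m := m.toNat)
  split_ifs <;> constructor <;> first | positivity | omega

-- both ports depend on data only through the two masked nibbles
theorem nibble_eq (h l : Int) (hh0 : 0 ≤ h) (hh : h < 16) (hl0 : 0 ≤ l) (hl : l < 16) :
    (let s : Int × Int × Int × Int :=
      (List.range 4).foldl
        (fun (st : Int × Int × Int × Int) (i : Nat) =>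
          let (high, low, r47, r03) := st
          let b := (PySem.Int.band high 0x01) <<< (i * 2 + 1)
          let a := (PySem.Int.band low 0x01) <<< (i * 2 + 1)
          (high >>> 1, low >>> 1, r47 + b, r03 + a))
        (h, l, 0, 0)
     ((s.2.2.1, s.2.2.2) : Int × Int))
    = (pvSPREAD.getD h.toNat 0, pvSPREAD.getD l.toNat 0) := by
  interval_cases h <;> interval_cases l <;> decide

theorem bitop_discharge_spec : Claim_equal_bitop_discharge := by
  intro data _
  unfold Spec_bitop_discharge bitop_discharge bitop_discharge_alt
  have h240 := band_mask_bounds data 240 (by norm_num)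
  have h15 := band_mask_bounds data 15 (by norm_num)
  set v : Int := PySem.Int.band data (240 : Int) with hv
  set l : Int := PySem.Int.band data (15 : Int) with hl
  obtain ⟨n, hn⟩ := Int.eq_ofNat_of_zero_le h240.1
  have hsh : v >>> 4 = ((n >>> 4 : Nat) : Int) := by rw [hn]; rfl
  have hn240 : n ≤ 240 := by omega
  have hb : 0 ≤ v >>> 4 ∧ v >>> 4 < 16 := by
    rw [hsh]
    constructor
    · positivity
    · have : n >>> 4 < 16 := by omega
      exact_mod_cast this
  have := nibble_eq (v >>> 4) l hb.1 hb.2 h15.1 (by omega)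
  simpa using this
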